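-- pv_equiv track=rewrite | github.com/letishka/AASD2 | 2lab/variable_length_encoding.py | rle_vlc_encode_ac
-- ===== SOURCE A (Python) =====
-- def get_category(value):
--     if value == 0:
--         return 0
--     abs_val = abs(value)
--     cat = 1
--     bound = 1
--     while abs_val > bound:
--         cat += 1
--         bound = (1 << cat) - 1
--     return cat
--
-- def vlc_encode_value(value, category):
--     if category == 0:
--         return ""
--     if value > 0:
--         bits = bin(value)[2:]
--         if len(bits) > category:
--             raise ValueError("Value too large")
--         return bits.zfill(category)
--     else:
--         min_neg = -((1 << category) - 1)
--         offset = value - min_neg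
--         bits = bin(offset)[2:]
--         return bits.zfill(category)
--
-- def rle_vlc_encode_ac(ac_list):
--     result = []
--     zeros = 0
--     for coeff in ac_list:
--         if coeff == 0:
--             zeros += 1
--             if zeros == 16:
--                 result.append((15, 0, ""))
--                 zeros = 0
--         else:
--             while zeros >= 16:
--                 result.append((15, 0, ""))
--                 zeros -= 16
--             cat = get_category(coeff)
--             bits = vlc_encode_value(coeff, cat)
--             result.append((zeros, cat, bits))
--             zeros = 0
--     result.append((0, 0, ""))
--     return result
-- ===== SOURCE B (Python) =====
-- def rle_vlc_encode_ac(ac_list):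
--     nz = [(i, v) for i, v in enumerate(ac_list) if v != 0]
--     out = []
--     prev = 0
--     for i, v in nz:
--         run = i - prev
--         out += [(15, 0, "")] * (run // 16)
--         cat = abs(v).bit_length()
--         x = v if v > 0 else v + (1 << cat) - 1
--         bits = ''.join('1' if (x >> k) & 1 else '0' for k in range(cat - 1, -1, -1))
--         out.append((run % 16, cat, bits))
--         prev = i + 1
--     trailing = len(ac_list) - prev
--     out += [(15, 0, "")] * (trailing // 16)
--     out.append((0, 0, ""))
--     return out
-- ===== Notes on version B (the rewrite author's own statement) =====
-- stated objective: alternative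
-- what changed: B replaces A's per-coefficient zero-counter state machine by a two-phase decomposition: it first collects the (index, value) pairs of nonzero coefficients, then emits run//16 ZRL markers and one (run%16, category, bits) triple per nonzero via bit_length and a direct fixed-width bit string, with trailing//16 ZRLs and the EOB appended once at the end.
import Mathlib
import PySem

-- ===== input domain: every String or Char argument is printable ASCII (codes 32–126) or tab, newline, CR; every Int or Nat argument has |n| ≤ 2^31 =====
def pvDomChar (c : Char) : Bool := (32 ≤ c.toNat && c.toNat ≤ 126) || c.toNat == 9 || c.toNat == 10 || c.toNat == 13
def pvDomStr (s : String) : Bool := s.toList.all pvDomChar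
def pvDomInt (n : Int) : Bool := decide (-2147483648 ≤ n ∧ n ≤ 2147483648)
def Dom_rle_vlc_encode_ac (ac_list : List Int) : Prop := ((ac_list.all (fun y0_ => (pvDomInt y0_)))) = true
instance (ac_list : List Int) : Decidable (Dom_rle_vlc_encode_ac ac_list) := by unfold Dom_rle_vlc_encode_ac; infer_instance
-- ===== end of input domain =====

-- B re-decomposes the encoder: one pass over the nonzero coefficients (with their indices)
-- emitting run//16 ZRL markers and the (run%16, category, bits) triple per nonzero, instead of
-- A's per-coefficient zero counter; same return value on every input (alternative decomposition).

-- ===== PORT A =====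
-- while loop of get_category; Python keeps 'bound' as a second variable, but it is
-- always (1 << cat) - 1 at the test (set from cat on every iteration), so it is inlined here.
def get_category_loop (abs_val : Int) (cat : Nat) : Nat :=
  if abs_val > (1 <<< cat) - 1 then get_category_loop abs_val (cat + 1) else cat
termination_by (abs_val + 1 - ((1 : Int) <<< cat)).toNat
decreasing_by
  simp only [Int.shiftLeft_eq, Nat.shiftLeft_eq, one_mul] at *
  push_cast at *
  have h3 : (2 : Int) ^ (cat + 1) = 2 * 2 ^ cat := by ring
  have h4 : (1 : Int) ≤ 2 ^ cat := one_le_pow₀ (by norm_num)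
  omega

def get_category (value : Int) : Int :=
  if value = 0 then 0
  else (get_category_loop |value| 1 : Int)

-- returns none where Python raises ValueError ("Value too large")
def vlc_encode_value (value : Int) (category : Int) : Option String :=
  if category = 0 then some ""
  else if value > 0 then
    let bits := PySem.List.slice (PySem.Int.toBinChars0b value) (some 2) none  -- bin(value)[2:]
    if (bits.length : Int) > category then none
    else some (String.ofList (PySem.Chars.zfill bits category))
  else
    let min_neg := -(((1 : Int) <<< category.toNat) - 1)  -- category ≥ 0 whenever A reaches here
    let offset := value - min_neg
    let bits := PySem.List.slice (PySem.Int.toBinChars0b offset) (some 2) none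
    some (String.ofList (PySem.Chars.zfill bits category))

-- the 'while zeros >= 16' drain inside the nonzero branch
def drain_zrl (result : List (Int × Int × String)) (zeros : Int) :
    List (Int × Int × String) × Int :=
  if zeros ≥ 16 then drain_zrl (result ++ [(15, 0, "")]) (zeros - 16) else (result, zeros)
termination_by zeros.toNat
decreasing_by omega

-- the body of A's `for coeff in ac_list` loop, acting on the state (result, zeros)
def rle_vlc_step (st : List (Int × Int × String) × Int) (coeff : Int) :
    List (Int × Int × String) × Int :=
  if coeff = 0 then
    let zeros := st.2 + 1
    if zeros = 16 then (st.1 ++ [(15, 0, "")], 0) else (st.1, zeros)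
  else
    let rz := drain_zrl st.1 st.2
    let cat := get_category coeff
    match vlc_encode_value coeff cat with
    | some bits => (rz.1 ++ [(rz.2, cat, bits)], 0)
    | none => (rz.1, 0)  -- unreachable: with cat = get_category coeff no ValueError occurs (vlc_eq below)

def rle_vlc_encode_ac (ac_list : List Int) : List (Int × Int × String) :=
  (ac_list.foldl rle_vlc_step ([], 0)).1 ++ [(0, 0, "")]

-- ===== PORT B =====
-- ''.join('1' if (x >> k) & 1 else '0' for k in range(cat - 1, -1, -1))
def bits_top_down (x : Int) : Nat → List Char
  | 0 => []
  | w + 1 => (if PySem.Int.band (x >>> (w : Nat)) 1 = 1 then '1' else '0') :: bits_top_down x w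

-- the body of B's `for i, v in nz` loop, acting on the state (out, prev)
def rle_vlc_alt_step (st : List (Int × Int × String) × Int) (p : Int × Int) :
    List (Int × Int × String) × Int :=
  let run := p.1 - st.2
  let out := st.1 ++ PySem.List.pyRepeat [((15 : Int), (0 : Int), "")] (PySem.Int.floordiv run 16)
  let cat := (PySem.Int.bitLength p.2 : Int)   -- abs(v).bit_length()
  let x := if p.2 > 0 then p.2 else p.2 + (((1 : Int) <<< cat.toNat) - 1)
  let bits := String.ofList (bits_top_down x cat.toNat)
  (out ++ [(PySem.Int.mod run 16, cat, bits)], p.1 + 1)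

def rle_vlc_encode_ac_alt (ac_list : List Int) : List (Int × Int × String) :=
  let nz := (PySem.List.enumerate ac_list 0).filter (fun p => p.2 ≠ 0)
  let st := nz.foldl rle_vlc_alt_step ([], 0)
  let trailing := (ac_list.length : Int) - st.2
  (st.1 ++ PySem.List.pyRepeat [((15 : Int), (0 : Int), "")] (PySem.Int.floordiv trailing 16))
    ++ [(0, 0, "")]

-- ===== PRECONDITION & SPEC =====
def Spec_rle_vlc_encode_ac (ac_list : List Int) (out : List (Int × Int × String)) : Prop := out = rle_vlc_encode_ac_alt ac_list
instance (ac_list : List Int) (out : List (Int × Int × String)) : Decidable (Spec_rle_vlc_encode_ac ac_list out) := by unfold Spec_rle_vlc_encode_ac; infer_instance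

-- ===== CLAIM (what is proved, stated in full; the proofs are below) =====
def Claim_equal_rle_vlc_encode_ac : Prop := ∀ (ac_list : List Int), Dom_rle_vlc_encode_ac ac_list → Spec_rle_vlc_encode_ac ac_list (rle_vlc_encode_ac ac_list)

-- ===== LEMMAS AND PROOFS =====

lemma one_shiftLeft_int (k : Nat) : ((1 : Int) <<< k) = 2 ^ k := by
  simp [Int.shiftLeft_eq]

-- `Nat.toDigits 2` satisfies the obvious fuel-free recursion `pvRep`.
def pvRep (n : Nat) : List Char :=
  if n < 2 then [Nat.digitChar n] else pvRep (n / 2) ++ [Nat.digitChar (n % 2)]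

-- the common MSB-first fixed-width bit string both encoders produce
def pvBits (n : Nat) : Nat → List Char
  | 0 => []
  | w + 1 => pvBits (n / 2) w ++ [Nat.digitChar (n % 2)]

lemma toDigitsCore_eq_pvRep : ∀ (f n : Nat) (acc : List Char), n ≤ f →
    Nat.toDigitsCore 2 (f + 1) n acc = pvRep n ++ acc := by
  intro f
  induction f with
  | zero =>
    intro n acc h
    have : n = 0 := by omega
    subst this
    simp [Nat.toDigitsCore, pvRep]
  | succ f ih =>
    intro n acc h
    by_cases h2 : n / 2 = 0
    · have hn : n < 2 := by omega
      rw [pvRep]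
      simp [Nat.toDigitsCore, h2, hn, Nat.mod_eq_of_lt hn]
    · have hn : ¬ n < 2 := by omega
      rw [pvRep, if_neg hn]
      have : Nat.toDigitsCore 2 (f + 1 + 1) n acc
          = Nat.toDigitsCore 2 (f + 1) (n / 2) (Nat.digitChar (n % 2) :: acc) := by
        simp [Nat.toDigitsCore, h2]
      rw [this, ih (n / 2) _ (by omega)]
      simp

lemma toDigits_eq_pvRep (n : Nat) : Nat.toDigits 2 n = pvRep n := by
  have := toDigitsCore_eq_pvRep n n [] (le_refl n)
  simpa [Nat.toDigits] using this

lemma pvRep_ne_nil (n : Nat) : pvRep n ≠ [] := by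
  rw [pvRep]; split_ifs <;> simp

lemma pvRep_bits (n : Nat) : ∀ c ∈ pvRep n, c = '0' ∨ c = '1' := by
  fun_induction pvRep with
  | case1 n h =>
    intro c hc
    interval_cases n <;> simp_all [Nat.digitChar]
  | case2 n h ih =>
    intro c hc
    simp only [List.mem_append, List.mem_singleton] at hc
    rcases hc with hc | hc
    · exact ih c hc
    · subst hc
      have : n % 2 = 0 ∨ n % 2 = 1 := by omega
      rcases this with h0 | h0 <;> simp [h0, Nat.digitChar]

lemma pvRep_length_le (n w : Nat) (hw : 0 < w) (h : n < 2 ^ w) : (pvRep n).length ≤ w := by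
  rw [← toDigits_eq_pvRep]
  exact Nat.toDigits_length 2 n w hw h

lemma pvBits_zero (w : Nat) : pvBits 0 w = List.replicate w '0' := by
  induction w with
  | zero => rfl
  | succ w ih => rw [pvBits, List.replicate_succ']; simp [ih, Nat.digitChar]

lemma zfill_pad (c : Char) (rest : List Char) (w : Int)
    (h : ¬(c = '+' ∨ c = '-')) :
    PySem.Chars.zfill (c :: rest) w
      = List.replicate (w.toNat - (c :: rest).length) '0' ++ (c :: rest) := by
  rw [PySem.Chars.zfill]
  split_ifs with h1
  · have h2 : w.toNat - (rest.length + 1) = 0 := by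
      simp only [List.length_cons] at h1
      omega
    simp only [List.length_cons, h2]
    simp
  · simp [h]

lemma pad_pvRep : ∀ (w n : Nat), n < 2 ^ (w + 1) →
    List.replicate ((w + 1) - (pvRep n).length) '0' ++ pvRep n = pvBits n (w + 1) := by
  intro w
  induction w with
  | zero =>
    intro n h
    have hn : n < 2 := by omega
    rw [pvRep, if_pos hn, pvBits, pvBits]
    simp [Nat.mod_eq_of_lt hn]
  | succ w ih =>
    intro n h
    by_cases hn : n < 2
    · rw [pvRep, if_pos hn, pvBits]
      have h0 : n / 2 = 0 := by omega
      rw [h0, pvBits_zero]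
      simp [Nat.mod_eq_of_lt hn]
    · rw [pvRep, if_neg hn, pvBits]
      have hp : n / 2 < 2 ^ (w + 1) := by
        have : 2 ^ (w + 1 + 1) = 2 ^ (w + 1) * 2 := by ring
        omega
      have hlen : (pvRep (n / 2)).length ≤ w + 1 := pvRep_length_le _ _ (by omega) hp
      rw [← ih (n / 2) hp]
      simp only [List.length_append, List.length_singleton]
      rw [show (w + 1 + 1) - ((pvRep (n / 2)).length + 1) = (w + 1) - (pvRep (n / 2)).length
        from by omega]
      simp [List.append_assoc]

lemma zfill_pvRep (w n : Nat) (hw : 0 < w) (h : n < 2 ^ w) :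
    PySem.Chars.zfill (pvRep n) (w : Int) = pvBits n w := by
  obtain ⟨w', rfl⟩ : ∃ w', w = w' + 1 := ⟨w - 1, by omega⟩
  obtain ⟨c, rest, hcr⟩ := List.exists_cons_of_ne_nil (pvRep_ne_nil n)
  have hc : c = '0' ∨ c = '1' := pvRep_bits n c (by rw [hcr]; exact List.mem_cons_self)
  have hpad := pad_pvRep w' n h
  rw [hcr] at hpad ⊢
  rw [zfill_pad c rest _ (by rcases hc with h | h <;> simp [h])]
  rw [← hpad]
  simp

lemma pvBits_cons : ∀ (w n : Nat),
    pvBits n (w + 1) = (if (n >>> w) &&& 1 = 1 then '1' else '0') :: pvBits n w := by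
  intro w
  induction w with
  | zero =>
    intro n
    show pvBits (n / 2) 0 ++ [Nat.digitChar (n % 2)] = _ :: pvBits n 0
    have h0 : n >>> 0 = n := rfl
    rw [h0, Nat.and_one_is_mod]
    have h2 : n % 2 = 0 ∨ n % 2 = 1 := by omega
    rcases h2 with h | h <;> simp [pvBits, h, Nat.digitChar]
  | succ w ih =>
    intro n
    have e1 : pvBits n (w + 1 + 1) = pvBits (n / 2) (w + 1) ++ [Nat.digitChar (n % 2)] := rfl
    have e2 : pvBits n (w + 1) = pvBits (n / 2) w ++ [Nat.digitChar (n % 2)] := rfl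
    have hs : (n / 2) >>> w = n >>> (w + 1) := by
      simp [Nat.shiftRight_eq_div_pow, Nat.div_div_eq_div_mul, pow_succ']
    rw [e1, ih (n / 2), e2, hs]
    simp

lemma bits_top_down_natCast (n : Nat) : ∀ w : Nat, bits_top_down (n : Int) w = pvBits n w := by
  intro w
  induction w with
  | zero => rfl
  | succ w ih =>
    rw [bits_top_down, ih, pvBits_cons w n]
    have h1 : ((n : Int) >>> w) = ((n >>> w : Nat) : Int) := rfl
    rw [h1, show (1 : Int) = ((1 : Nat) : Int) from rfl, PySem.Int.band_natCast]
    simp only [Nat.cast_inj]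

lemma bitLength_pos (v : Int) (hv : v ≠ 0) : 0 < PySem.Int.bitLength v := by
  by_contra h
  have h0 : PySem.Int.bitLength v = 0 := by omega
  have := PySem.Int.lt_two_pow_bitLength v
  rw [h0] at this
  simp only [pow_zero] at this
  have : v.natAbs = 0 := by omega
  exact hv (by omega)

lemma bitLength_abs (v : Int) : PySem.Int.bitLength |v| = PySem.Int.bitLength v := by
  rcases abs_choice v with h | h
  · rw [h]
  · rw [h, PySem.Int.bitLength_neg]

lemma get_category_loop_eq (a : Int) (ha : 0 < a) :
    ∀ cat : Nat, get_category_loop a cat = max cat (PySem.Int.bitLength a) := by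
  intro cat
  fun_induction get_category_loop with
  | case1 cat hgt ih =>
    rw [ih]
    have h1 : ((2 ^ cat : Nat) : Int) ≤ a := by
      simp only [Nat.shiftLeft_eq, one_mul] at hgt
      omega
    have h2 : 2 ^ cat ≤ a.natAbs := by omega
    have h3 := PySem.Int.lt_two_pow_bitLength a
    have h4 : cat < PySem.Int.bitLength a :=
      (Nat.pow_lt_pow_iff_right (by norm_num)).mp (lt_of_le_of_lt h2 h3)
    omega
  | case2 cat hle =>
    simp only [Nat.shiftLeft_eq, one_mul] at hle
    have h2 : a.natAbs < 2 ^ cat := by omega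
    have h3 := PySem.Int.two_pow_bitLength_le a (by omega)
    have h4 : PySem.Int.bitLength a ≤ cat := by
      have h6 := (Nat.pow_lt_pow_iff_right (show 1 < 2 by norm_num)).mp (lt_of_le_of_lt h3 h2)
      omega
    omega

lemma get_category_eq (v : Int) (hv : v ≠ 0) :
    get_category v = (PySem.Int.bitLength v : Int) := by
  rw [get_category, if_neg hv, get_category_loop_eq |v| (by positivity) 1]
  rw [bitLength_abs]
  have := bitLength_pos v hv
  omega

-- per-nonzero-value: A's (category, bits) pair equals B's
lemma vlc_eq (v : Int) (hv : v ≠ 0) :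
    vlc_encode_value v (get_category v) =
      some (String.ofList (bits_top_down
        (if v > 0 then v else v + (((1 : Int) <<< PySem.Int.bitLength v) - 1))
        (PySem.Int.bitLength v))) := by
  rw [get_category_eq v hv]
  have hWpos : 0 < PySem.Int.bitLength v := bitLength_pos v hv
  have habs := PySem.Int.lt_two_pow_bitLength v
  set W := PySem.Int.bitLength v with hW
  have h2W : ((2 : Int) ^ W) = ((2 ^ W : Nat) : Int) := by push_cast; ring
  rw [vlc_encode_value]
  rw [if_neg (by exact_mod_cast (by omega : ¬ (W : Int) = 0))]
  by_cases hpos : v > 0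
  · rw [if_pos hpos, if_pos hpos]
    have hv0 : ¬ v < 0 := by omega
    have hnat : v = ((v.toNat : Nat) : Int) := by omega
    simp only [PySem.Int.toBinChars0b, if_neg hv0]
    rw [PySem.List.slice_from _ (by norm_num : (0 : Int) ≤ 2)]
    simp only [show ((2 : Int)).toNat = 2 from rfl, List.drop_succ_cons, List.drop_zero]
    rw [toDigits_eq_pvRep]
    have hlt : v.toNat < 2 ^ W := by omega
    have hlen : (pvRep v.toNat).length ≤ W := pvRep_length_le _ _ hWpos hlt
    rw [if_neg (by exact_mod_cast (by omega : ¬ ((pvRep v.toNat).length : Int) > (W : Int)))]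
    rw [zfill_pvRep W v.toNat hWpos hlt]
    conv_rhs => rw [hnat, bits_top_down_natCast]
  · rw [if_neg hpos, if_neg hpos]
    have hneg : v < 0 := by omega
    rw [show ((W : Int)).toNat = W from Int.toNat_natCast W, one_shiftLeft_int]
    simp only [show v - -((2 : Int) ^ W - 1) = v + ((2 : Int) ^ W - 1) from by ring]
    have hvnat : v = -((v.natAbs : Nat) : Int) := by omega
    have hoffge : (0 : Int) ≤ v + ((2 : Int) ^ W - 1) := by omega
    have hofflt : (v + ((2 : Int) ^ W - 1)).toNat < 2 ^ W := by omega
    have hoff0 : ¬ (v + ((2 : Int) ^ W - 1)) < 0 := by omega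
    simp only [PySem.Int.toBinChars0b, if_neg hoff0]
    rw [PySem.List.slice_from _ (by norm_num : (0 : Int) ≤ 2)]
    simp only [show ((2 : Int)).toNat = 2 from rfl, List.drop_succ_cons, List.drop_zero]
    rw [toDigits_eq_pvRep, zfill_pvRep W _ hWpos hofflt]
    conv_rhs => rw [show v + ((2 : Int) ^ W - 1)
        = (((v + ((2 : Int) ^ W - 1)).toNat : Nat) : Int) from by omega,
      bits_top_down_natCast]

-- the common emission sequence: what both programs append after a given point,
-- given the current in-group zero count z (A's `zeros` state, always < 16)
def pvEmit : List Int → Int → List (Int × Int × String)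
  | [], _ => []
  | c :: l, z =>
    if c = 0 then
      (if z + 1 = 16 then ((15 : Int), (0 : Int), "") :: pvEmit l 0 else pvEmit l (z + 1))
    else
      (z, (PySem.Int.bitLength c : Int),
        String.ofList (bits_top_down
          (if c > 0 then c else c + (((1 : Int) <<< PySem.Int.bitLength c) - 1))
          (PySem.Int.bitLength c))) :: pvEmit l 0

lemma drain_zrl_small (result : List (Int × Int × String)) (z : Int) (h : z < 16) :
    drain_zrl result z = (result, z) := by
  unfold drain_zrl
  rw [if_neg (by omega)]

lemma foldA_eq_pvEmit : ∀ (l : List Int) (res : List (Int × Int × String)) (z : Int),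
    0 ≤ z → z < 16 →
    (l.foldl rle_vlc_step (res, z)).1 = res ++ pvEmit l z := by
  intro l
  induction l with
  | nil => intro res z _ _; simp [pvEmit]
  | cons c l ih =>
    intro res z hz0 hz16
    rw [List.foldl_cons, pvEmit]
    by_cases hc : c = 0
    · subst hc
      show (List.foldl rle_vlc_step
        (if z + 1 = 16 then (res ++ [(15, 0, "")], 0) else (res, z + 1)) l).1 = _
      rw [if_pos (show (0 : Int) = 0 from rfl)]
      by_cases h16 : z + 1 = 16
      · rw [if_pos h16, if_pos h16, ih _ 0 (by omega) (by omega)]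
        simp
      · rw [if_neg h16, if_neg h16, ih _ (z + 1) (by omega) (by omega)]
    · have hv2 : vlc_encode_value c ((PySem.Int.bitLength c : Nat) : Int)
          = some (String.ofList (bits_top_down
              (if c > 0 then c else c + (((1 : Int) <<< PySem.Int.bitLength c) - 1))
              (PySem.Int.bitLength c))) := by
        rw [← get_category_eq c hc]
        exact vlc_eq c hc
      have hstep : rle_vlc_step (res, z) c
          = (res ++ [((z : Int), (PySem.Int.bitLength c : Int),
              String.ofList (bits_top_down
                (if c > 0 then c else c + (((1 : Int) <<< PySem.Int.bitLength c) - 1))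
                (PySem.Int.bitLength c)))], 0) := by
        simp only [rle_vlc_step, if_neg hc, drain_zrl_small res z hz16,
          get_category_eq c hc, hv2]
      rw [hstep, if_neg hc, ih _ 0 (by omega) (by omega)]
      simp

lemma floordiv_16 (z m : Nat) (hz : z < 16) :
    PySem.Int.floordiv ((z : Int) + 16 * (m : Int)) 16 = (m : Int) := by
  rw [PySem.Int.floordiv_eq_iff_of_pos (by norm_num)]
  constructor <;> push_cast <;> omega

lemma mod_16 (z m : Nat) (hz : z < 16) :
    PySem.Int.mod ((z : Int) + 16 * (m : Int)) 16 = (z : Int) := by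
  rw [PySem.Int.mod_eq_emod_of_pos (by norm_num)]
  omega

lemma foldB_eq_pvEmit : ∀ (l : List Int) (k prev : Int) (out : List (Int × Int × String))
    (z m : Nat), k - prev = z + 16 * m → z < 16 →
    (((PySem.List.enumerate l k).filter (fun p => p.2 ≠ 0)).foldl
        rle_vlc_alt_step (out, prev)).1
     ++ PySem.List.pyRepeat [((15 : Int), (0 : Int), "")]
       (PySem.Int.floordiv ((k + l.length) -
        (((PySem.List.enumerate l k).filter (fun p => p.2 ≠ 0)).foldl
          rle_vlc_alt_step (out, prev)).2) 16)
    = out ++ List.replicate m ((15 : Int), (0 : Int), "") ++ pvEmit l (z : Int) := by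
  intro l
  induction l with
  | nil =>
    intro k prev out z m hk hz
    simp only [PySem.List.enumerate_nil, List.filter_nil, List.foldl_nil, List.length_nil,
      Nat.cast_zero, add_zero, pvEmit, List.append_nil]
    rw [show k - prev = (z : Int) + 16 * (m : Int) from hk, floordiv_16 z m hz,
      PySem.List.pyRepeat_singleton]
    simp
  | cons c l ih =>
    intro k prev out z m hk hz
    rw [PySem.List.enumerate_cons]
    by_cases hc : c = 0
    · subst hc
      have hf : ((k, (0 : Int)) :: PySem.List.enumerate l (k + 1)).filter (fun p => p.2 ≠ 0)
          = (PySem.List.enumerate l (k + 1)).filter (fun p => p.2 ≠ 0) := by simp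
      rw [hf, pvEmit]
      simp only [if_pos rfl, List.length_cons, Nat.cast_add, Nat.cast_one]
      rw [show k + ((l.length : Int) + 1) = (k + 1) + (l.length : Int) from by ring]
      by_cases h16 : (z : Int) + 1 = 16
      · rw [if_pos h16]
        have hrw := ih (k + 1) prev out 0 (m + 1) (by push_cast; omega) (by omega)
        simp only [Nat.cast_zero] at hrw
        rw [hrw, List.replicate_succ']
        simp [List.append_assoc]
      · rw [if_neg h16]
        have hrw := ih (k + 1) prev out (z + 1) m (by push_cast; omega) (by omega)
        rw [hrw]
        push_cast
        ring_nf
    · have hf : ((k, c) :: PySem.List.enumerate l (k + 1)).filter (fun p => p.2 ≠ 0)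
          = (k, c) :: (PySem.List.enumerate l (k + 1)).filter (fun p => p.2 ≠ 0) := by
        simp [hc]
      rw [hf, List.foldl_cons, pvEmit, if_neg hc]
      have hstep : rle_vlc_alt_step (out, prev) (k, c)
          = (out ++ PySem.List.pyRepeat [((15 : Int), (0 : Int), "")]
                (PySem.Int.floordiv (k - prev) 16)
              ++ [(PySem.Int.mod (k - prev) 16, (PySem.Int.bitLength c : Int),
                String.ofList (bits_top_down
                  (if c > 0 then c else c + (((1 : Int) <<< ((PySem.Int.bitLength c : Int)).toNat) - 1))
                  ((PySem.Int.bitLength c : Int)).toNat))], k + 1) := rfl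
      rw [hstep]
      have hrw := ih (k + 1) (k + 1)
        (out ++ PySem.List.pyRepeat [((15 : Int), (0 : Int), "")]
            (PySem.Int.floordiv (k - prev) 16)
          ++ [(PySem.Int.mod (k - prev) 16, (PySem.Int.bitLength c : Int),
            String.ofList (bits_top_down
              (if c > 0 then c else c + (((1 : Int) <<< ((PySem.Int.bitLength c : Int)).toNat) - 1))
              ((PySem.Int.bitLength c : Int)).toNat))])
        0 0 (by omega) (by omega)
      simp only [Nat.cast_zero, List.replicate_zero, List.append_nil, mul_zero, add_zero] at hrw
      rw [List.length_cons, Nat.cast_add, Nat.cast_one,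
        show k + ((l.length : Int) + 1) = (k + 1) + (l.length : Int) from by ring, hrw]
      rw [show k - prev = (z : Int) + 16 * (m : Int) from hk, floordiv_16 z m hz, mod_16 z m hz,
        PySem.List.pyRepeat_singleton, Int.toNat_natCast]
      simp [List.append_assoc]

-- ===== VERDICT (by name: the statement is the Claim_ definition above) =====
theorem rle_vlc_encode_ac_spec : Claim_equal_rle_vlc_encode_ac := by
  intro l _
  show rle_vlc_encode_ac l = rle_vlc_encode_ac_alt l
  have hA := foldA_eq_pvEmit l [] 0 (by omega) (by omega)
  have hB := foldB_eq_pvEmit l 0 0 [] 0 0 (by omega) (by omega)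
  rw [List.nil_append] at hA
  simp only [Nat.cast_zero, List.replicate_zero, List.nil_append, List.append_nil,
    zero_add] at hB
  have hAe : rle_vlc_encode_ac l = (l.foldl rle_vlc_step ([], 0)).1 ++ [(0, 0, "")] := rfl
  have hBe : rle_vlc_encode_ac_alt l =
      ((((PySem.List.enumerate l 0).filter (fun p => p.2 ≠ 0)).foldl
          rle_vlc_alt_step ([], 0)).1
        ++ PySem.List.pyRepeat [((15 : Int), (0 : Int), "")]
          (PySem.Int.floordiv (((l.length : Int)) -
            (((PySem.List.enumerate l 0).filter (fun p => p.2 ≠ 0)).foldl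
              rle_vlc_alt_step ([], 0)).2) 16))
      ++ [(0, 0, "")] := rfl
  rw [hAe, hBe, hA, hB]
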